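-- pv_equiv track=rewrite | github.com/xiwujiufei2565/SDNDDPG | SoteInit.py | dijkstra_init
-- ===== SOURCE A (Python) =====
-- WEIGHT_MAX = 10000
--
-- def dijkstra_init(topology, vertex_num):
--     # topology---网络的拓扑结构信息      vertex_num---节点的个数
--
--     # 存储最短路径
--     # 由于最短路径可能会有多条，所以用列表来进行存储
--     # path[x][y]-----表示顶点x到y的最短路径需要经过的上一个节点，若有不同值则表示有多条路径
--     path = [[[] for y in range(vertex_num)] for x in range(vertex_num)]
--
--     # 计算所有节点到目的节点的最短路径
--     # 若不存在则其值为0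
--     for source in range(vertex_num):
--         cost = []  # 存储最短路径值,0表示未接通
--         # 初始化cost和set数组,以及对应的path数组
--         for dst in range(vertex_num):
--             cost.append(topology[source][dst])
--             if topology[source][dst] != 0:
--                 path[source][dst].append(source)
--
--         set = [0 for x in range(vertex_num)]  # 顶点是否被访问过
--         set[source] = 1
--
--         for i in range(vertex_num):
--             min = WEIGHT_MAX
--             min_index = -1
--             # 寻找最小顶点
--             for j in range(vertex_num):
--                 if (set[j] != 1 and cost[j] != 0 and cost[j] < min):
--                     min = cost[j]
--                     min_index = j
--             if min_index == -1:
--                 continue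
--             set[min_index] = 1  # 该节点访问过
--             # 更新其他节点到达目的节点的最短路径
--             for j in range(vertex_num):
--                 if set[j] != 1 and topology[min_index][j] != 0:
--                     if cost[j] == 0 or topology[min_index][j] + cost[min_index] < cost[j]:
--                         cost[j] = topology[min_index][j] + cost[min_index]
--                         # 由于出现了别之前存储的路径更小的，所以之前不管有多条路径都要清空
--                         path[source][j].clear()
--                         path[source][j].append(min_index )
--                     elif cost[j] != 0 and topology[min_index][j] + cost[min_index] == cost[j]:
--                         # 如果相等，表示可能存在多条路径，所以需要加入到当前集合中
--                         # 在初始化时，已经将source加入了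
--                         path[source][j].append(min_index)
--     return path
-- ===== SOURCE B (Python) =====
-- WEIGHT_MAX = 10000
--
-- def dijkstra_init(topology, vertex_num):
--     # Priority-queue Dijkstra per source: instead of n fixed passes each doing a
--     # linear min-scan over all vertices, keep a sorted worklist of (cost, node)
--     # pairs with lazy deletion (skip stale/visited entries) and stop when it is
--     # empty.  Ties pop the lowest node index, matching the min-scan's tie-break.
--     def insort(pq, item):
--         i = 0
--         while i < len(pq) and pq[i] < item:
--             i += 1
--         pq.insert(i, item)
--
--     result = []
--     for source in range(vertex_num):
--         cost = [topology[source][j] for j in range(vertex_num)]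
--         row = [[source] if c != 0 else [] for c in cost]
--         visited = [False] * vertex_num
--         visited[source] = True
--         pq = []
--         for j in range(vertex_num):
--             if not visited[j] and cost[j] != 0 and cost[j] < WEIGHT_MAX:
--                 insort(pq, (cost[j], j))
--         while pq:
--             c, u = pq.pop(0)
--             if visited[u] or c != cost[u]:
--                 continue  # stale entry or already settled
--             visited[u] = True
--             for j in range(vertex_num):
--                 w = topology[u][j]
--                 if not visited[j] and w != 0:
--                     if cost[j] == 0 or w + c < cost[j]:
--                         cost[j] = w + c
--                         row[j] = [u]
--                         if cost[j] != 0 and cost[j] < WEIGHT_MAX: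
--                             insort(pq, (cost[j], j))
--                     elif w + c == cost[j]:
--                         row[j].append(u)
--         result.append(row)
--     return result
-- ===== Notes on version B (the rewrite author's own statement) =====
-- stated objective: alternative
-- what changed: B replaces A's n fixed outer passes each doing a linear min-scan over all vertices by a per-source priority-queue Dijkstra: a sorted worklist of (cost, node) pairs with lazy deletion, popping the front, skipping stale or already-visited entries, pushing a new entry whenever a vertex's cost improves, and stopping as soon as the worklist is empty.
import Mathlib
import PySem

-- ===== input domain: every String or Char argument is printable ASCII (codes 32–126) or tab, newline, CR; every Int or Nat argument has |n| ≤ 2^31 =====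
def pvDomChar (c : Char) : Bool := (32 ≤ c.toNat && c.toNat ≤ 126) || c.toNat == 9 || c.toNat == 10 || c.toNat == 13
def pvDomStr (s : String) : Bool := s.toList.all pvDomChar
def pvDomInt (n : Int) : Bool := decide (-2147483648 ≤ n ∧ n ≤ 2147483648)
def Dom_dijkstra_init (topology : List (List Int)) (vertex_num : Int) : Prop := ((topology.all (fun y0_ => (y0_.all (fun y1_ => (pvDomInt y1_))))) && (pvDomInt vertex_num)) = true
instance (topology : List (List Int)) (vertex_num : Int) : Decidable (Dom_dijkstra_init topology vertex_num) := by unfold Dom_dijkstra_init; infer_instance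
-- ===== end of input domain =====

-- B replaces A's n fixed outer passes with their linear min-scans by a per-source
-- priority-queue (sorted worklist) Dijkstra with lazy deletion: updated vertices are
-- inserted into a sorted (cost, node) list, the front is popped, and stale or visited
-- entries are skipped; the loop stops when the worklist is empty (objective: alternative).

-- ===== PORT A =====
def WEIGHT_MAX : Int := 10000

-- body of A's first inner loop (cost.append / seed path[source][dst])
def aInit (topology : List (List Int)) (source : Int)
    (st : List Int × List (List (List Int))) (dst : Int) :
    List Int × List (List (List Int)) :=
  let w := PySem.List.pyGetD (PySem.List.pyGetD topology source []) dst 0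
  (st.1 ++ [w],
   if w ≠ 0 then
     PySem.List.pySetD st.2 source
       (PySem.List.pySetD (PySem.List.pyGetD st.2 source []) dst
         ((PySem.List.pyGetD (PySem.List.pyGetD st.2 source []) dst []) ++ [source]))
   else st.2)

-- body of A's min-scan loop
def aScan (cost set : List Int) (mm : Int × Int) (j : Int) : Int × Int :=
  if PySem.List.pyGetD set j 0 ≠ 1 ∧ PySem.List.pyGetD cost j 0 ≠ 0 ∧
     PySem.List.pyGetD cost j 0 < mm.1
  then (PySem.List.pyGetD cost j 0, j) else mm

-- body of A's relaxation loop (state: cost, set, path)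
def aRelax (topology : List (List Int)) (source min_index : Int)
    (st : List Int × List Int × List (List (List Int))) (j : Int) :
    List Int × List Int × List (List (List Int)) :=
  if PySem.List.pyGetD st.2.1 j 0 ≠ 1 ∧
     PySem.List.pyGetD (PySem.List.pyGetD topology min_index []) j 0 ≠ 0 then
    if PySem.List.pyGetD st.1 j 0 = 0 ∨
       PySem.List.pyGetD (PySem.List.pyGetD topology min_index []) j 0 +
         PySem.List.pyGetD st.1 min_index 0 < PySem.List.pyGetD st.1 j 0 then
      (PySem.List.pySetD st.1 j
         (PySem.List.pyGetD (PySem.List.pyGetD topology min_index []) j 0 +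
           PySem.List.pyGetD st.1 min_index 0),
       st.2.1,
       PySem.List.pySetD st.2.2 source
         (PySem.List.pySetD (PySem.List.pyGetD st.2.2 source []) j [min_index]))
    else if PySem.List.pyGetD st.1 j 0 ≠ 0 ∧
       PySem.List.pyGetD (PySem.List.pyGetD topology min_index []) j 0 +
         PySem.List.pyGetD st.1 min_index 0 = PySem.List.pyGetD st.1 j 0 then
      (st.1, st.2.1,
       PySem.List.pySetD st.2.2 source
         (PySem.List.pySetD (PySem.List.pyGetD st.2.2 source []) j
           ((PySem.List.pyGetD (PySem.List.pyGetD st.2.2 source []) j []) ++ [min_index])))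
    else st
  else st

-- body of A's outer 'for i in range(vertex_num)' loop (the index i is unused)
def aStep (topology : List (List Int)) (source vertex_num : Int)
    (st : List Int × List Int × List (List (List Int))) :
    List Int × List Int × List (List (List Int)) :=
  let mm := (PySem.List.pyRange 0 vertex_num 1).foldl (aScan st.1 st.2.1) (WEIGHT_MAX, -1)
  if mm.2 = -1 then st
  else
    (PySem.List.pyRange 0 vertex_num 1).foldl (aRelax topology source mm.2)
      (st.1, PySem.List.pySetD st.2.1 mm.2 1, st.2.2)

def dijkstra_init (topology : List (List Int)) (vertex_num : Int) : List (List (List Int)) :=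
  let path := (PySem.List.pyRange 0 vertex_num 1).map
      (fun _x => (PySem.List.pyRange 0 vertex_num 1).map (fun _y => ([] : List Int)))
  (PySem.List.pyRange 0 vertex_num 1).foldl (fun path source =>
    let st0 := (PySem.List.pyRange 0 vertex_num 1).foldl (aInit topology source) ([], path)
    let set := PySem.List.pySetD ((PySem.List.pyRange 0 vertex_num 1).map (fun _x => (0 : Int))) source 1
    let stF := (PySem.List.pyRange 0 vertex_num 1).foldl
        (fun st _i => aStep topology source vertex_num st) (st0.1, set, st0.2)
    stF.2.2) path

-- ===== PORT B =====
-- Source B's insort helper: linear scan for the first position whose entry is not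
-- smaller (Python tuple '<' is lexicographic), insert there; as structural recursion
def bInsort (pq : List (Int × Int)) (it : Int × Int) : List (Int × Int) :=
  match pq with
  | [] => [it]
  | x :: xs =>
    if x.1 < it.1 ∨ (x.1 = it.1 ∧ x.2 < it.2) then x :: bInsort xs it
    else it :: x :: xs

-- body of Source B's initial 'for j in range(vertex_num)' push loop
def bInitPush (cost : List Int) (visited : List Bool) (pq : List (Int × Int)) (j : Int) :
    List (Int × Int) :=
  if PySem.List.pyGetD visited j false = false ∧ PySem.List.pyGetD cost j 0 ≠ 0 ∧
     PySem.List.pyGetD cost j 0 < WEIGHT_MAX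
  then bInsort pq (PySem.List.pyGetD cost j 0, j) else pq

-- body of Source B's relaxation loop (state: cost, row, pq)
def bRelax (topology : List (List Int)) (u c : Int) (visited : List Bool)
    (st : List Int × List (List Int) × List (Int × Int)) (j : Int) :
    List Int × List (List Int) × List (Int × Int) :=
  let w := PySem.List.pyGetD (PySem.List.pyGetD topology u []) j 0
  if PySem.List.pyGetD visited j false = false ∧ w ≠ 0 then
    if PySem.List.pyGetD st.1 j 0 = 0 ∨ w + c < PySem.List.pyGetD st.1 j 0 then
      let cost' := PySem.List.pySetD st.1 j (w + c)
      (cost', PySem.List.pySetD st.2.1 j [u],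
       if PySem.List.pyGetD cost' j 0 ≠ 0 ∧ PySem.List.pyGetD cost' j 0 < WEIGHT_MAX then
         bInsort st.2.2 (PySem.List.pyGetD cost' j 0, j)
       else st.2.2)
    else if w + c = PySem.List.pyGetD st.1 j 0 then
      (st.1, PySem.List.pySetD st.2.1 j ((PySem.List.pyGetD st.2.1 j []) ++ [u]), st.2.2)
    else st
  else st

-- termination helper for bLoop (cited in decreasing_by)
lemma pv_count_false_set_lt : ∀ (l : List Bool) (i : Nat), i < l.length → l[i]! = false →
    (l.set i true).count false < l.count false := by
  intro l
  induction l with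
  | nil => intro i h _; simp at h
  | cons b t ih =>
    intro i h hf
    cases i with
    | zero =>
      simp at hf
      simp [hf]
    | succ k =>
      have hk : k < t.length := by simpa using h
      have hf' : t[k]! = false := by simpa [List.getElem!_cons_succ] using hf
      have := ih k hk hf'
      have hset : (b :: t).set (k+1) true = b :: t.set k true := rfl
      rw [hset]
      simp only [List.count_cons]
      omega

-- Source B's 'while pq' loop: pop the front (c, u), skip stale/visited entries,
-- otherwise mark u visited and relax its row
def bLoop (topology : List (List Int)) (vertex_num : Int) (cost : List Int)
    (row : List (List Int)) (visited : List Bool) (pq : List (Int × Int)) :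
    List (List Int) :=
  match pq with
  | [] => row
  | (c, u) :: rest =>
    if h1 : 0 ≤ u ∧ u < (visited.length : Int) then
      if h2 : PySem.List.pyGetD visited u false = true ∨ c ≠ PySem.List.pyGetD cost u 0 then
        bLoop topology vertex_num cost row visited rest
      else
        let visited' := PySem.List.pySetD visited u true
        let st := (PySem.List.pyRange 0 vertex_num 1).foldl (bRelax topology u c visited')
          (cost, row, rest)
        bLoop topology vertex_num st.1 st.2.1 visited' st.2.2
    else row  -- Python raises IndexError on visited[u] here; unreachable from dijkstra_init_alt
termination_by (visited.count false, pq.length)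
decreasing_by
  · apply Prod.Lex.right; simp
  · apply Prod.Lex.left
    push Not at h2
    have hu0 : 0 ≤ u := h1.1
    have huL : u.toNat < visited.length := by omega
    have hfalse : visited[u.toNat]! = false := by
      have := h2.1
      rw [PySem.List.pyGetD_eq_getElem visited false hu0 (by exact_mod_cast h1.2)] at this
      simp only [Bool.not_eq_true] at this
      rw [List.getElem!_eq_getElem?_getD, List.getElem?_eq_getElem huL]
      simpa using this
    have hset : PySem.List.pySetD visited u true = visited.set u.toNat true :=
      PySem.List.pySetD_of_nonneg visited true hu0
    rw [hset]
    exact pv_count_false_set_lt visited u.toNat huL hfalse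

-- Source B's per-source loop body
def bSource (topology : List (List Int)) (vertex_num source : Int) : List (List Int) :=
  let cost := (PySem.List.pyRange 0 vertex_num 1).map
      (fun j => PySem.List.pyGetD (PySem.List.pyGetD topology source []) j 0)
  let row := cost.map (fun c => if c ≠ 0 then [source] else ([] : List Int))
  let visited := PySem.List.pySetD ((PySem.List.pyRange 0 vertex_num 1).map (fun _ => false))
      source true
  let pq := (PySem.List.pyRange 0 vertex_num 1).foldl (bInitPush cost visited) []
  bLoop topology vertex_num cost row visited pq

def dijkstra_init_alt (topology : List (List Int)) (vertex_num : Int) : List (List (List Int)) :=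
  (PySem.List.pyRange 0 vertex_num 1).foldl
    (fun result source => result ++ [bSource topology vertex_num source]) []

-- ===== PRECONDITION & SPEC =====
-- Pre_ excludes exactly the inputs on which Python A raises IndexError:
-- vertex_num larger than the matrix (fewer than vertex_num rows, or a row among the
-- first vertex_num with fewer than vertex_num entries).
def Pre_dijkstra_init (topology : List (List Int)) (vertex_num : Int) : Prop :=
  vertex_num ≤ (topology.length : Int) ∧
  ∀ row ∈ topology.take vertex_num.toNat, vertex_num ≤ (row.length : Int)
instance (topology : List (List Int)) (vertex_num : Int) : Decidable (Pre_dijkstra_init topology vertex_num) := by unfold Pre_dijkstra_init; infer_instance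

def pvWitness_dijkstra_init : List (List Int) × Int := ([[0, 2, 0], [2, 0, 3], [0, 3, 0]], 3)

def Spec_dijkstra_init (topology : List (List Int)) (vertex_num : Int) (out : List (List (List Int))) : Prop := out = dijkstra_init_alt topology vertex_num
instance (topology : List (List Int)) (vertex_num : Int) (out : List (List (List Int))) : Decidable (Spec_dijkstra_init topology vertex_num out) := by unfold Spec_dijkstra_init; infer_instance

-- ===== CLAIM (what is proved, stated in full; the proofs are below) =====
def Claim_equal_dijkstra_init : Prop := ∀ (topology : List (List Int)) (vertex_num : Int), Dom_dijkstra_init topology vertex_num → Pre_dijkstra_init topology vertex_num → Spec_dijkstra_init topology vertex_num (dijkstra_init topology vertex_num)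

-- ===== LEMMAS AND PROOFS =====
-- ==== basic indexing lemmas (Int-indexed get/set, nonnegative indices) ====

lemma pv_getD_nonneg {α : Type} (xs : List α) {j : Int} (d : α) (hj : 0 ≤ j) :
    PySem.List.pyGetD xs j d = xs.getD j.toNat d := by
  have h : j = ((j.toNat : Nat) : Int) := (Int.toNat_of_nonneg hj).symm
  rw [h, PySem.List.pyGetD_natCast]; simp
  have h2 : (max j 0).toNat = j.toNat := by omega
  rw [h2]

lemma pv_get_set_self {α : Type} (xs : List α) {i : Int} (v d : α) (h0 : 0 ≤ i)
    (h1 : i < (xs.length : Int)) :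
    PySem.List.pyGetD (PySem.List.pySetD xs i v) i d = v := by
  rw [PySem.List.pySetD_of_nonneg _ _ h0, pv_getD_nonneg _ _ h0]
  have : i.toNat < xs.length := by omega
  simp [List.getD, this]

lemma pv_get_set_ne {α : Type} (xs : List α) {i j : Int} (v d : α) (h0 : 0 ≤ i)
    (hj : 0 ≤ j) (hne : j ≠ i) :
    PySem.List.pyGetD (PySem.List.pySetD xs i v) j d = PySem.List.pyGetD xs j d := by
  rw [PySem.List.pySetD_of_nonneg _ _ h0, pv_getD_nonneg _ _ hj, pv_getD_nonneg _ _ hj]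
  have : i.toNat ≠ j.toNat := by omega
  simp [List.getD, this]

lemma pv_set_set {α : Type} (xs : List α) {i : Int} (v w : α) (h0 : 0 ≤ i) :
    PySem.List.pySetD (PySem.List.pySetD xs i v) i w = PySem.List.pySetD xs i w := by
  rw [PySem.List.pySetD_of_nonneg _ _ h0, PySem.List.pySetD_of_nonneg _ _ h0,
      PySem.List.pySetD_of_nonneg _ _ h0, List.set_set]

lemma pv_set_get_self {α : Type} (xs : List α) {i : Int} (d : α) (h0 : 0 ≤ i)
    (h1 : i < (xs.length : Int)) :
    PySem.List.pySetD xs i (PySem.List.pyGetD xs i d) = xs := by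
  rw [PySem.List.pySetD_of_nonneg _ _ h0, PySem.List.pyGetD_eq_getElem _ _ h0 h1]
  exact List.set_getElem_self _

lemma pv_foldl_iterate {σ : Type} (f : σ → σ) (l : List Int) (init : σ) :
    l.foldl (fun st _ => f st) init = f^[l.length] init := by
  induction l generalizing init with
  | nil => rfl
  | cons a t ih => simpa [Function.iterate_succ_apply] using ih (f init)

lemma pv_sorted_eq {l₁ l₂ : List Int} (h₁ : l₁.Pairwise (· < ·)) (h₂ : l₂.Pairwise (· < ·))
    (hm : ∀ a, a ∈ l₁ ↔ a ∈ l₂) : l₁ = l₂ := by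
  have n₁ : l₁.Nodup := h₁.imp (fun h => ne_of_lt h)
  have n₂ : l₂.Nodup := h₂.imp (fun h => ne_of_lt h)
  have hp : l₁.Perm l₂ := (List.perm_ext_iff_of_nodup n₁ n₂).mpr hm
  exact hp.eq_of_pairwise (fun a b _ _ hab hba => absurd hba (not_lt_of_gt hab)) h₁ h₂

-- ==== proof-side intermediate: A's per-source loop re-expressed with min? over a
-- ==== shrinking unvisited list (bridged to A above and to B's worklist loop below) ====

def mRelax (t : List (List Int)) (u base : Int)
    (st : List Int × List (List Int)) (j : Int) : List Int × List (List Int) :=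
  let w := PySem.List.pyGetD (PySem.List.pyGetD t u []) j 0
  if w = 0 then st
  else
    let d := w + base
    let cj := PySem.List.pyGetD st.1 j 0
    if cj = 0 ∨ d < cj then (PySem.List.pySetD st.1 j d, PySem.List.pySetD st.2 j [u])
    else if d = cj then
      (st.1, PySem.List.pySetD st.2 j ((PySem.List.pyGetD st.2 j []) ++ [u]))
    else st

def mLoop (t : List (List Int)) (cost : List Int) (remaining : List Int)
    (row : List (List Int)) : List (List Int) :=
  let candidates := remaining.filter
      (fun j => decide (0 ≠ PySem.List.pyGetD cost j 0 ∧ PySem.List.pyGetD cost j 0 < WEIGHT_MAX))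
  match h : PySem.List.min? candidates (fun j => PySem.List.pyGetD cost j 0) with
  | none => row
  | some u =>
    let remaining' := remaining.erase u
    let st := remaining'.foldl (mRelax t u (PySem.List.pyGetD cost u 0)) (cost, row)
    mLoop t st.1 remaining' st.2
termination_by remaining.length
decreasing_by
  have hc := PySem.List.min?_mem h
  have hu : u ∈ remaining := by
    simp only [candidates, List.mem_unattach, List.mem_filter, List.mem_attach] at hc
    rcases hc with ⟨hm, -⟩
    simpa using hm
  have h1 := List.length_erase_of_mem hu
  have h2 : 0 < remaining.length := List.length_pos_of_mem hu
  omega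

def mRow (topology : List (List Int)) (vertex_num source : Int) : List (List Int) :=
  let cost := (PySem.List.pyRange 0 vertex_num 1).map
      (fun dst => PySem.List.pyGetD (PySem.List.pyGetD topology source []) dst 0)
  let row := (PySem.List.pyRange 0 vertex_num 1).map
      (fun dst => if PySem.List.pyGetD cost dst 0 ≠ 0 then [source] else ([] : List Int))
  let remaining := (PySem.List.pyRange 0 vertex_num 1).filter (fun v => decide (v ≠ source))
  mLoop topology cost remaining row

-- ==== proof-side row-level versions of A's loops (A acts on path only through row `source`) ====

def aInitRow (topology : List (List Int)) (source : Int)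
    (st : List Int × List (List Int)) (dst : Int) : List Int × List (List Int) :=
  let w := PySem.List.pyGetD (PySem.List.pyGetD topology source []) dst 0
  (st.1 ++ [w],
   if w ≠ 0 then PySem.List.pySetD st.2 dst ((PySem.List.pyGetD st.2 dst []) ++ [source])
   else st.2)

def aRelaxRow (topology : List (List Int)) (u : Int)
    (st : List Int × List Int × List (List Int)) (j : Int) :
    List Int × List Int × List (List Int) :=
  if PySem.List.pyGetD st.2.1 j 0 ≠ 1 ∧
     PySem.List.pyGetD (PySem.List.pyGetD topology u []) j 0 ≠ 0 then
    if PySem.List.pyGetD st.1 j 0 = 0 ∨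
       PySem.List.pyGetD (PySem.List.pyGetD topology u []) j 0 +
         PySem.List.pyGetD st.1 u 0 < PySem.List.pyGetD st.1 j 0 then
      (PySem.List.pySetD st.1 j
         (PySem.List.pyGetD (PySem.List.pyGetD topology u []) j 0 +
           PySem.List.pyGetD st.1 u 0),
       st.2.1, PySem.List.pySetD st.2.2 j [u])
    else if PySem.List.pyGetD st.1 j 0 ≠ 0 ∧
       PySem.List.pyGetD (PySem.List.pyGetD topology u []) j 0 +
         PySem.List.pyGetD st.1 u 0 = PySem.List.pyGetD st.1 j 0 then
      (st.1, st.2.1,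
       PySem.List.pySetD st.2.2 j ((PySem.List.pyGetD st.2.2 j []) ++ [u]))
    else st
  else st

def aStepRow (topology : List (List Int)) (vertex_num : Int)
    (st : List Int × List Int × List (List Int)) : List Int × List Int × List (List Int) :=
  let mm := (PySem.List.pyRange 0 vertex_num 1).foldl (aScan st.1 st.2.1) (WEIGHT_MAX, -1)
  if mm.2 = -1 then st
  else
    (PySem.List.pyRange 0 vertex_num 1).foldl (aRelaxRow topology mm.2)
      (st.1, PySem.List.pySetD st.2.1 mm.2 1, st.2.2)

def aRowFull (topology : List (List Int)) (vertex_num source : Int)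
    (row0 : List (List Int)) : List (List Int) :=
  ((PySem.List.pyRange 0 vertex_num 1).foldl (fun st _i => aStepRow topology vertex_num st)
    (((PySem.List.pyRange 0 vertex_num 1).foldl (aInitRow topology source) ([], row0)).1,
     PySem.List.pySetD ((PySem.List.pyRange 0 vertex_num 1).map (fun _x => (0 : Int))) source 1,
     ((PySem.List.pyRange 0 vertex_num 1).foldl (aInitRow topology source) ([], row0)).2)).2.2

def aBody (topology : List (List Int)) (vertex_num : Int)
    (path : List (List (List Int))) (source : Int) : List (List (List Int)) :=
  ((PySem.List.pyRange 0 vertex_num 1).foldl (fun st _i => aStep topology source vertex_num st)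
    (((PySem.List.pyRange 0 vertex_num 1).foldl (aInit topology source) ([], path)).1,
     PySem.List.pySetD ((PySem.List.pyRange 0 vertex_num 1).map (fun _x => (0 : Int))) source 1,
     ((PySem.List.pyRange 0 vertex_num 1).foldl (aInit topology source) ([], path)).2)).2.2

-- visited-array / unvisited-list correspondence
def pvInvA (n : Int) (set rem : List Int) : Prop :=
  set.length = n.toNat ∧ rem.Pairwise (· < ·) ∧
  ∀ j, j ∈ rem ↔ (0 ≤ j ∧ j < n ∧ PySem.List.pyGetD set j 0 ≠ 1)

-- ==== factorization of A's grid operations through row `source` ====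

lemma pv_init_factor (t : List (List Int)) (s : Int) (hs0 : 0 ≤ s) (l : List Int) :
    ∀ (c : List Int) (P : List (List (List Int))) (r : List (List Int)), s < (P.length : Int) →
    l.foldl (aInit t s) (c, PySem.List.pySetD P s r)
      = ((l.foldl (aInitRow t s) (c, r)).1,
         PySem.List.pySetD P s (l.foldl (aInitRow t s) (c, r)).2) := by
  induction l with
  | nil => intro c P r hP; rfl
  | cons dst tl ih =>
    intro c P r hP
    have hget : PySem.List.pyGetD (PySem.List.pySetD P s r) s [] = r :=
      pv_get_set_self P r [] hs0 hP
    have hbody : aInit t s (c, PySem.List.pySetD P s r) dst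
        = ((aInitRow t s (c, r) dst).1, PySem.List.pySetD P s (aInitRow t s (c, r) dst).2) := by
      simp only [aInit, aInitRow]
      by_cases hw : PySem.List.pyGetD (PySem.List.pyGetD t s []) dst 0 ≠ 0
      · simp [hw, hget, pv_set_set P _ _ hs0]
      · simp [hw]
    simp only [List.foldl_cons]
    rw [hbody]
    exact ih _ P _ hP

lemma pv_relax_factor (t : List (List Int)) (s u : Int) (hs0 : 0 ≤ s) (l : List Int) :
    ∀ (c set : List Int) (P : List (List (List Int))) (r : List (List Int)), s < (P.length : Int) →
    l.foldl (aRelax t s u) (c, set, PySem.List.pySetD P s r)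
      = ((l.foldl (aRelaxRow t u) (c, set, r)).1,
         (l.foldl (aRelaxRow t u) (c, set, r)).2.1,
         PySem.List.pySetD P s (l.foldl (aRelaxRow t u) (c, set, r)).2.2) := by
  induction l with
  | nil => intro c set P r hP; rfl
  | cons j tl ih =>
    intro c set P r hP
    have hget : PySem.List.pyGetD (PySem.List.pySetD P s r) s [] = r :=
      pv_get_set_self P r [] hs0 hP
    have hbody : aRelax t s u (c, set, PySem.List.pySetD P s r) j
        = ((aRelaxRow t u (c, set, r) j).1, (aRelaxRow t u (c, set, r) j).2.1,
           PySem.List.pySetD P s (aRelaxRow t u (c, set, r) j).2.2) := by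
      simp only [aRelax, aRelaxRow]
      split_ifs with h1 h2 h3
      · simp [hget, pv_set_set P _ _ hs0]
      · simp [hget, pv_set_set P _ _ hs0]
      · rfl
      · rfl
    simp only [List.foldl_cons]
    rw [hbody]
    have := ih (aRelaxRow t u (c, set, r) j).1 (aRelaxRow t u (c, set, r) j).2.1 P
      (aRelaxRow t u (c, set, r) j).2.2 hP
    simpa using this

lemma pv_step_factor (t : List (List Int)) (n s : Int) (hs0 : 0 ≤ s)
    (c set : List Int) (P : List (List (List Int))) (r : List (List Int))
    (hP : s < (P.length : Int)) :
    aStep t s n (c, set, PySem.List.pySetD P s r)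
      = ((aStepRow t n (c, set, r)).1, (aStepRow t n (c, set, r)).2.1,
         PySem.List.pySetD P s (aStepRow t n (c, set, r)).2.2) := by
  simp only [aStep, aStepRow]
  by_cases hmm : ((PySem.List.pyRange 0 n 1).foldl (aScan c set) (WEIGHT_MAX, -1)).2 = -1
  · simp [hmm]
  · simp only [hmm, if_false]
    exact pv_relax_factor t s _ hs0 _ c (PySem.List.pySetD set _ 1) P r hP

lemma pv_iter_factor (t : List (List Int)) (n s : Int) (hs0 : 0 ≤ s) (m : Nat) :
    ∀ (c set : List Int) (P : List (List (List Int))) (r : List (List Int)),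
      s < (P.length : Int) →
    (fun st => aStep t s n st)^[m] (c, set, PySem.List.pySetD P s r)
      = (((aStepRow t n)^[m] (c, set, r)).1, ((aStepRow t n)^[m] (c, set, r)).2.1,
         PySem.List.pySetD P s (((aStepRow t n)^[m] (c, set, r)).2.2)) := by
  induction m with
  | zero => intro c set P r hP; rfl
  | succ k ih =>
    intro c set P r hP
    rw [Function.iterate_succ_apply, Function.iterate_succ_apply]
    rw [pv_step_factor t n s hs0 c set P r hP]
    have := ih (aStepRow t n (c, set, r)).1 (aStepRow t n (c, set, r)).2.1 P
      (aStepRow t n (c, set, r)).2.2 hP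
    simpa using this

-- ==== the min-scan ↔ min() correspondence ====

lemma pv_scan_found (key : Int → Int) (M : Int) (z : Int × Int) (l : List Int) :
    ∀ (u : Int), key u < M →
    l.foldl (fun mm j => if key j ≠ 0 ∧ key j < mm.1 then (key j, j) else mm) (key u, u)
      = match PySem.List.min? (u :: l.filter (fun j => decide (key j ≠ 0 ∧ key j < M))) key with
        | none => z
        | some v => (key v, v) := by
  induction l with
  | nil =>
    intro u hu
    have h1 : PySem.List.min? [u] key = some u := by simp [PySem.List.min?]
    simp [h1]
  | cons j t ih =>
    intro u hu
    by_cases hp : key j ≠ 0 ∧ key j < M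
    · have hd : decide (key j ≠ 0 ∧ key j < M) = true := by simpa using hp
      rw [List.filter_cons, hd, if_pos rfl]
      by_cases hlt : key j < key u
      · rw [List.foldl_cons, if_pos (show key j ≠ 0 ∧ key j < (key u, u).1 from ⟨hp.1, hlt⟩)]
        rw [ih j hp.2]
        have habs : PySem.List.min? (u :: j :: t.filter (fun j => decide (key j ≠ 0 ∧ key j < M))) key
            = PySem.List.min? (j :: t.filter (fun j => decide (key j ≠ 0 ∧ key j < M))) key := by
          simp [PySem.List.min?, hlt]
        rw [habs]
      · rw [List.foldl_cons, if_neg (show ¬(key j ≠ 0 ∧ key j < (key u, u).1) from fun hc => hlt hc.2)]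
        rw [ih u hu]
        have habs : PySem.List.min? (u :: j :: t.filter (fun j => decide (key j ≠ 0 ∧ key j < M))) key
            = PySem.List.min? (u :: t.filter (fun j => decide (key j ≠ 0 ∧ key j < M))) key := by
          simp [PySem.List.min?, hlt]
        rw [habs]
    · have hd : decide (key j ≠ 0 ∧ key j < M) = false := by simpa using hp
      have hcond : ¬ (key j ≠ 0 ∧ key j < (key u, u).1) := by
        rcases not_and_or.mp hp with h | h
        · exact fun hc => h hc.1
        · exact fun hc => h (lt_trans hc.2 hu)
      rw [List.filter_cons, hd, if_neg (by simp)]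
      rw [List.foldl_cons, if_neg hcond]
      exact ih u hu

lemma pv_scan_spec (key : Int → Int) (M x : Int) (l : List Int) :
    l.foldl (fun mm j => if key j ≠ 0 ∧ key j < mm.1 then (key j, j) else mm) (M, x)
      = match PySem.List.min? (l.filter (fun j => decide (key j ≠ 0 ∧ key j < M))) key with
        | none => (M, x)
        | some v => (key v, v) := by
  induction l with
  | nil => rfl
  | cons j t ih =>
    by_cases hp : key j ≠ 0 ∧ key j < M
    · have hd : decide (key j ≠ 0 ∧ key j < M) = true := by simpa using hp
      rw [List.foldl_cons, if_pos (show key j ≠ 0 ∧ key j < (M, x).1 from hp)]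
      rw [pv_scan_found key M (M, x) t j hp.2]
      rw [List.filter_cons, hd, if_pos rfl]
    · have hd : decide (key j ≠ 0 ∧ key j < M) = false := by simpa using hp
      rw [List.foldl_cons, if_neg (show ¬(key j ≠ 0 ∧ key j < (M, x).1) from hp)]
      rw [List.filter_cons, hd, if_neg (by simp)]
      exact ih

lemma pv_scan_guard (c set : List Int) (l : List Int) (mm0 : Int × Int) :
    l.foldl (aScan c set) mm0
      = (l.filter (fun j => decide (PySem.List.pyGetD set j 0 ≠ 1))).foldl
          (fun mm j => if PySem.List.pyGetD c j 0 ≠ 0 ∧ PySem.List.pyGetD c j 0 < mm.1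
                       then (PySem.List.pyGetD c j 0, j) else mm) mm0 := by
  rw [← PySem.List.foldl_ite_eq_foldl_filter (fun j => PySem.List.pyGetD set j 0 ≠ 1)]
  apply PySem.List.foldl_congr_mem
  intro acc x hx
  by_cases h : PySem.List.pyGetD set x 0 ≠ 1 <;> simp [aScan, h]

-- ==== invariant: visited array vs unvisited list ====

lemma pv_rem_filter {n : Int} {set rem : List Int} (h : pvInvA n set rem) :
    (PySem.List.pyRange 0 n 1).filter (fun j => decide (PySem.List.pyGetD set j 0 ≠ 1)) = rem := by
  apply pv_sorted_eq
  · exact (PySem.List.pairwise_lt_pyRange_one 0 n).filter _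
  · exact h.2.1
  · intro a
    simp only [List.mem_filter, PySem.List.mem_pyRange_one, h.2.2 a, decide_eq_true_eq]
    tauto

lemma pv_b_candidates (c : List Int) (rem : List Int) :
    rem.filter (fun j => decide (0 ≠ PySem.List.pyGetD c j 0 ∧ PySem.List.pyGetD c j 0 < WEIGHT_MAX))
      = rem.filter (fun j => decide (PySem.List.pyGetD c j 0 ≠ 0 ∧ PySem.List.pyGetD c j 0 < WEIGHT_MAX)) := by
  apply List.filter_congr
  intro x _
  simp [ne_comm]

lemma pv_relaxrow_filter (t : List (List Int)) (u : Int) (set : List Int) (l : List Int) :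
    ∀ (c : List Int) (r : List (List Int)),
    l.foldl (aRelaxRow t u) (c, set, r)
      = (l.filter (fun j => decide (PySem.List.pyGetD set j 0 ≠ 1))).foldl
          (aRelaxRow t u) (c, set, r) := by
  induction l with
  | nil => intro c r; rfl
  | cons j tl ih =>
    intro c r
    rw [List.foldl_cons, List.filter_cons]
    by_cases h : PySem.List.pyGetD set j 0 ≠ 1
    · have hd : decide (PySem.List.pyGetD set j 0 ≠ 1) = true := by simpa using h
      rw [hd, if_pos rfl, List.foldl_cons]
      have hkeep : aRelaxRow t u (c, set, r) j
          = ((aRelaxRow t u (c, set, r) j).1, set, (aRelaxRow t u (c, set, r) j).2.2) := by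
        simp only [aRelaxRow]; split_ifs <;> rfl
      rw [hkeep, ih]
    · have hd : decide (PySem.List.pyGetD set j 0 ≠ 1) = false := by simpa using h
      have hbody : aRelaxRow t u (c, set, r) j = (c, set, r) := by
        simp only [aRelaxRow]
        rw [if_neg (fun hc => h hc.1)]
      rw [hd, if_neg (by simp), hbody, ih]

-- ==== A's relaxation (live cost[min_index]) = m-relaxation (captured base) ====

lemma pv_relax_eq (t : List (List Int)) (u base : Int) (hu0 : 0 ≤ u) (set : List Int) (l : List Int) :
    ∀ (c : List Int) (r : List (List Int)),
      (∀ j ∈ l, 0 ≤ j ∧ PySem.List.pyGetD set j 0 ≠ 1) → u ∉ l →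
      PySem.List.pyGetD c u 0 = base →
      l.foldl (aRelaxRow t u) (c, set, r)
        = ((l.foldl (mRelax t u base) (c, r)).1, set, (l.foldl (mRelax t u base) (c, r)).2) := by
  induction l with
  | nil => intro c r _ _ _; rfl
  | cons j tl ih =>
    intro c r hall hnu hbase
    obtain ⟨hj0, hjset⟩ := hall j (by simp)
    have hjne : j ≠ u := fun h => hnu (by simp [h])
    have hnut : u ∉ tl := fun h => hnu (List.mem_cons_of_mem _ h)
    have halt : ∀ x ∈ tl, 0 ≤ x ∧ PySem.List.pyGetD set x 0 ≠ 1 :=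
      fun x hx => hall x (List.mem_cons_of_mem _ hx)
    rw [List.foldl_cons, List.foldl_cons]
    by_cases hw0 : PySem.List.pyGetD (PySem.List.pyGetD t u []) j 0 = 0
    · have hA : aRelaxRow t u (c, set, r) j = (c, set, r) := by
        simp only [aRelaxRow]
        rw [if_neg (fun hc => hc.2 hw0)]
      have hB : mRelax t u base (c, r) j = (c, r) := by
        simp only [mRelax]
        rw [if_pos hw0]
      rw [hA, hB]
      exact ih c r halt hnut hbase
    · have hA1 : aRelaxRow t u (c, set, r) j
          = (if PySem.List.pyGetD c j 0 = 0 ∨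
                PySem.List.pyGetD (PySem.List.pyGetD t u []) j 0 + base < PySem.List.pyGetD c j 0 then
               (PySem.List.pySetD c j (PySem.List.pyGetD (PySem.List.pyGetD t u []) j 0 + base),
                set, PySem.List.pySetD r j [u])
             else if PySem.List.pyGetD c j 0 ≠ 0 ∧
                PySem.List.pyGetD (PySem.List.pyGetD t u []) j 0 + base = PySem.List.pyGetD c j 0 then
               (c, set, PySem.List.pySetD r j ((PySem.List.pyGetD r j []) ++ [u]))
             else (c, set, r)) := by
        simp only [aRelaxRow, hbase]
        rw [if_pos ⟨hjset, hw0⟩]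
      have hB1 : mRelax t u base (c, r) j
          = (if PySem.List.pyGetD c j 0 = 0 ∨
                PySem.List.pyGetD (PySem.List.pyGetD t u []) j 0 + base < PySem.List.pyGetD c j 0 then
               (PySem.List.pySetD c j (PySem.List.pyGetD (PySem.List.pyGetD t u []) j 0 + base),
                PySem.List.pySetD r j [u])
             else if PySem.List.pyGetD c j 0 ≠ 0 ∧
                PySem.List.pyGetD (PySem.List.pyGetD t u []) j 0 + base = PySem.List.pyGetD c j 0 then
               (c, PySem.List.pySetD r j ((PySem.List.pyGetD r j []) ++ [u]))
             else (c, r)) := by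
        simp only [mRelax]
        rw [if_neg hw0]
        by_cases h1 : PySem.List.pyGetD c j 0 = 0 ∨
            PySem.List.pyGetD (PySem.List.pyGetD t u []) j 0 + base < PySem.List.pyGetD c j 0
        · rw [if_pos h1, if_pos h1]
        · rw [if_neg h1, if_neg h1]
          have hcj : PySem.List.pyGetD c j 0 ≠ 0 := fun h => h1 (Or.inl h)
          by_cases h2 : PySem.List.pyGetD (PySem.List.pyGetD t u []) j 0 + base
              = PySem.List.pyGetD c j 0
          · rw [if_pos h2, if_pos ⟨hcj, h2⟩]
          · rw [if_neg h2, if_neg (fun hc => h2 hc.2)]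
      rw [hA1, hB1]
      by_cases h1 : PySem.List.pyGetD c j 0 = 0 ∨
          PySem.List.pyGetD (PySem.List.pyGetD t u []) j 0 + base < PySem.List.pyGetD c j 0
      · rw [if_pos h1, if_pos h1]
        apply ih _ _ halt hnut
        rw [pv_get_set_ne c _ 0 hj0 hu0 (fun h => hjne h.symm)]
        exact hbase
      · rw [if_neg h1, if_neg h1]
        by_cases h2 : PySem.List.pyGetD c j 0 ≠ 0 ∧
            PySem.List.pyGetD (PySem.List.pyGetD t u []) j 0 + base = PySem.List.pyGetD c j 0
        · rw [if_pos h2, if_pos h2]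
          exact ih _ _ halt hnut hbase
        · rw [if_neg h2, if_neg h2]
          exact ih _ _ halt hnut hbase

-- ==== initial and preserved invariants ====

lemma pv_inv_init {n s : Int} (hs0 : 0 ≤ s) (hsn : s < n) :
    pvInvA n (PySem.List.pySetD ((PySem.List.pyRange 0 n 1).map (fun _x => (0:Int))) s 1)
      ((PySem.List.pyRange 0 n 1).filter (fun v => decide (v ≠ s))) := by
  have hlen : ((PySem.List.pyRange 0 n 1).map (fun _x => (0:Int))).length = n.toNat := by
    simp [PySem.List.length_pyRange_one]
  refine ⟨by simp [PySem.List.length_pySetD], (PySem.List.pairwise_lt_pyRange_one 0 n).filter _, ?_⟩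
  intro j
  simp only [List.mem_filter, PySem.List.mem_pyRange_one, decide_eq_true_eq]
  constructor
  · rintro ⟨⟨h0, h1⟩, hne⟩
    refine ⟨h0, h1, ?_⟩
    rw [pv_get_set_ne _ 1 0 hs0 h0 hne]
    rw [PySem.List.pyGetD_map_pyRange_of_nonneg (fun _x => (0:Int)) n j 0 h0 h1]
    omega
  · rintro ⟨h0, h1, hne⟩
    refine ⟨⟨h0, h1⟩, ?_⟩
    intro heq
    apply hne
    rw [heq, pv_get_set_self _ 1 0 hs0 (by rw [hlen]; omega)]

lemma pv_inv_step {n u : Int} {set rem : List Int} (h : pvInvA n set rem) (hu : u ∈ rem) :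
    pvInvA n (PySem.List.pySetD set u 1) (rem.erase u) := by
  obtain ⟨hlen, hsort, hmem⟩ := h
  obtain ⟨hu0, hun, -⟩ := (hmem u).mp hu
  have hnd : rem.Nodup := hsort.imp (fun h => ne_of_lt h)
  refine ⟨by simp [PySem.List.length_pySetD, hlen],
    hsort.sublist List.erase_sublist, ?_⟩
  intro j
  rw [hnd.mem_erase_iff]
  constructor
  · rintro ⟨hne, hj⟩
    obtain ⟨h0, h1, h2⟩ := (hmem j).mp hj
    refine ⟨h0, h1, ?_⟩
    rw [pv_get_set_ne set 1 0 hu0 h0 hne]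
    exact h2
  · rintro ⟨h0, h1, h2⟩
    by_cases hne : j = u
    · exfalso
      apply h2
      rw [hne, pv_get_set_self set 1 0 hu0 (by rw [hlen]; omega)]
    · rw [pv_get_set_ne set 1 0 hu0 h0 hne] at h2
      exact ⟨hne, (hmem j).mpr ⟨h0, h1, h2⟩⟩

-- ==== unfolding the m-loop ====

lemma pv_mLoop_none (t : List (List Int)) (c rem : List Int) (row : List (List Int))
    (h : PySem.List.min?
        (rem.filter (fun j => decide (0 ≠ PySem.List.pyGetD c j 0 ∧ PySem.List.pyGetD c j 0 < WEIGHT_MAX)))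
        (fun j => PySem.List.pyGetD c j 0) = none) :
    mLoop t c rem row = row := by
  rw [mLoop]
  split
  · rfl
  · next u heq =>
    simp only [ne_eq] at h
    rw [h] at heq
    cases heq

lemma pv_mLoop_some (t : List (List Int)) (c rem : List Int) (row : List (List Int)) (u : Int)
    (h : PySem.List.min?
        (rem.filter (fun j => decide (0 ≠ PySem.List.pyGetD c j 0 ∧ PySem.List.pyGetD c j 0 < WEIGHT_MAX)))
        (fun j => PySem.List.pyGetD c j 0) = some u) :
    mLoop t c rem row
      = mLoop t ((rem.erase u).foldl (mRelax t u (PySem.List.pyGetD c u 0)) (c, row)).1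
          (rem.erase u)
          ((rem.erase u).foldl (mRelax t u (PySem.List.pyGetD c u 0)) (c, row)).2 := by
  rw [mLoop]
  split
  · next heq =>
    simp only [ne_eq] at h
    rw [h] at heq
    cases heq
  · next v heq =>
    simp only [ne_eq] at h
    rw [h] at heq
    injection heq with hv
    subst hv
    rfl

-- ==== the main loop correspondence (A's iterated step = m-loop) ====

lemma pv_main (t : List (List Int)) (n : Int) :
    ∀ (m : Nat) (c set rem : List Int) (r : List (List Int)),
      pvInvA n set rem → rem.length ≤ m →
      ((aStepRow t n)^[m] (c, set, r)).2.2 = mLoop t c rem r := by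
  intro m
  induction m with
  | zero =>
    intro c set rem r hinv hle
    have hrem : rem = [] := List.eq_nil_of_length_eq_zero (Nat.le_zero.mp hle)
    subst hrem
    rw [pv_mLoop_none t c [] r (by simp [PySem.List.min?])]
    rfl
  | succ k ih =>
    intro c set rem r hinv hle
    have hscan : (PySem.List.pyRange 0 n 1).foldl (aScan c set) (WEIGHT_MAX, -1)
        = match PySem.List.min?
            (rem.filter (fun j => decide (PySem.List.pyGetD c j 0 ≠ 0 ∧ PySem.List.pyGetD c j 0 < WEIGHT_MAX)))
            (fun j => PySem.List.pyGetD c j 0) with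
          | none => (WEIGHT_MAX, -1)
          | some v => (PySem.List.pyGetD c v 0, v) := by
      rw [pv_scan_guard, pv_rem_filter hinv]
      exact pv_scan_spec (fun j => PySem.List.pyGetD c j 0) WEIGHT_MAX (-1) rem
    cases hmin : PySem.List.min?
        (rem.filter (fun j => decide (PySem.List.pyGetD c j 0 ≠ 0 ∧ PySem.List.pyGetD c j 0 < WEIGHT_MAX)))
        (fun j => PySem.List.pyGetD c j 0) with
    | none =>
      have hfix : aStepRow t n (c, set, r) = (c, set, r) := by
        simp only [aStepRow, hscan, hmin]
        simp
      rw [Function.iterate_fixed hfix]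
      rw [pv_mLoop_none t c rem r (by rw [pv_b_candidates]; exact hmin)]
    | some u =>
      have hu_cand := PySem.List.min?_mem hmin
      have hu_rem : u ∈ rem := List.mem_of_mem_filter hu_cand
      obtain ⟨hu0, hun, -⟩ := (hinv.2.2 u).mp hu_rem
      have hinv' := pv_inv_step hinv hu_rem
      have hnd : rem.Nodup := hinv.2.1.imp (fun h => ne_of_lt h)
      have hnot : u ∉ rem.erase u := fun hmem =>
        ((hnd.mem_erase_iff).mp hmem).1 rfl
      have hstep : aStepRow t n (c, set, r)
          = (((rem.erase u).foldl (mRelax t u (PySem.List.pyGetD c u 0)) (c, r)).1,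
             PySem.List.pySetD set u 1,
             ((rem.erase u).foldl (mRelax t u (PySem.List.pyGetD c u 0)) (c, r)).2) := by
        have hne : ¬ ((PySem.List.pyGetD c u 0, u).2 = -1) := by simp; omega
        simp only [aStepRow, hscan, hmin]
        rw [if_neg hne]
        rw [pv_relaxrow_filter, pv_rem_filter hinv']
        exact pv_relax_eq t u (PySem.List.pyGetD c u 0) hu0 (PySem.List.pySetD set u 1)
          (rem.erase u) c r
          (fun j hj => by
            obtain ⟨h0, h1, h2⟩ := (hinv'.2.2 j).mp hj
            exact ⟨h0, h2⟩)
          hnot rfl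
      rw [Function.iterate_succ_apply, hstep]
      have hlen' : (rem.erase u).length ≤ k := by
        have := List.length_erase_of_mem hu_rem
        have := List.length_pos_of_mem hu_rem
        omega
      rw [ih _ _ _ _ hinv' hlen']
      rw [pv_mLoop_some t c rem r u (by rw [pv_b_candidates]; exact hmin)]

-- ==== the initialization loop, characterized per index ====

lemma pv_initrow_nil (t : List (List Int)) (s n : Int) (a : Int) (c : List Int)
    (r : List (List Int)) (hna : n ≤ a) :
    ((PySem.List.pyRange a n 1).foldl (aInitRow t s) (c, r)).1
        = c ++ (PySem.List.pyRange a n 1).map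
            (fun dst => PySem.List.pyGetD (PySem.List.pyGetD t s []) dst 0) ∧
    ((PySem.List.pyRange a n 1).foldl (aInitRow t s) (c, r)).2.length = r.length ∧
    ∀ j : Int, 0 ≤ j →
      PySem.List.pyGetD ((PySem.List.pyRange a n 1).foldl (aInitRow t s) (c, r)).2 j []
        = if a ≤ j ∧ j < n ∧ PySem.List.pyGetD (PySem.List.pyGetD t s []) j 0 ≠ 0
          then PySem.List.pyGetD r j [] ++ [s] else PySem.List.pyGetD r j [] := by
  rw [PySem.List.pyRange_one_eq_nil hna]
  refine ⟨by simp, rfl, ?_⟩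
  intro j hj
  rw [if_neg (by omega : ¬(a ≤ j ∧ j < n ∧ PySem.List.pyGetD (PySem.List.pyGetD t s []) j 0 ≠ 0))]
  rfl

lemma pv_initrow (t : List (List Int)) (s n : Int) :
    ∀ (k : Nat) (a : Int) (c : List Int) (r : List (List Int)), 0 ≤ a →
      (n - a).toNat ≤ k → r.length = n.toNat →
    ((PySem.List.pyRange a n 1).foldl (aInitRow t s) (c, r)).1
        = c ++ (PySem.List.pyRange a n 1).map
            (fun dst => PySem.List.pyGetD (PySem.List.pyGetD t s []) dst 0) ∧
    ((PySem.List.pyRange a n 1).foldl (aInitRow t s) (c, r)).2.length = n.toNat ∧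
    ∀ j : Int, 0 ≤ j →
      PySem.List.pyGetD ((PySem.List.pyRange a n 1).foldl (aInitRow t s) (c, r)).2 j []
        = if a ≤ j ∧ j < n ∧ PySem.List.pyGetD (PySem.List.pyGetD t s []) j 0 ≠ 0
          then PySem.List.pyGetD r j [] ++ [s] else PySem.List.pyGetD r j [] := by
  intro k
  induction k with
  | zero =>
    intro a c r ha hk hr
    have hna : n ≤ a := by omega
    obtain ⟨e1, e2, e3⟩ := pv_initrow_nil t s n a c r hna
    exact ⟨e1, by rw [e2, hr], e3⟩
  | succ k ih =>
    intro a c r ha hk hr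
    by_cases hna : n ≤ a
    · obtain ⟨e1, e2, e3⟩ := pv_initrow_nil t s n a c r hna
      exact ⟨e1, by rw [e2, hr], e3⟩
    · have han : a < n := by omega
      rw [PySem.List.pyRange_one_cons han, List.foldl_cons, List.map_cons]
      have hbody : aInitRow t s (c, r) a
          = (c ++ [PySem.List.pyGetD (PySem.List.pyGetD t s []) a 0],
             if PySem.List.pyGetD (PySem.List.pyGetD t s []) a 0 ≠ 0
             then PySem.List.pySetD r a ((PySem.List.pyGetD r a []) ++ [s]) else r) := by
        simp only [aInitRow]
      rw [hbody]
      set w := fun dst => PySem.List.pyGetD (PySem.List.pyGetD t s []) dst 0 with hwdef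
      set r' := if w a ≠ 0 then PySem.List.pySetD r a ((PySem.List.pyGetD r a []) ++ [s]) else r
        with hr'def
      have hr' : r'.length = n.toNat := by
        rw [hr'def]; split_ifs <;> simp [PySem.List.length_pySetD, hr]
      obtain ⟨e1, e2, e3⟩ := ih (a + 1) (c ++ [w a]) r' (by omega) (by omega) hr'
      refine ⟨by rw [e1, List.append_assoc]; rfl, e2, ?_⟩
      intro j hj
      rw [e3 j hj]
      have hget : ∀ (hne : j ≠ a), PySem.List.pyGetD r' j [] = PySem.List.pyGetD r j [] := by
        intro hne
        rw [hr'def]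
        split_ifs with h
        · exact pv_get_set_ne r _ [] ha hj hne
        · rfl
      by_cases hja : j = a
      · subst hja
        rw [if_neg (by omega : ¬(j + 1 ≤ j ∧ j < n ∧ w j ≠ 0))]
        by_cases hw : w j ≠ 0
        · rw [if_pos ⟨le_refl j, han, hw⟩, hr'def, if_pos hw]
          exact pv_get_set_self r _ [] hj (by omega)
        · rw [if_neg (by tauto : ¬(j ≤ j ∧ j < n ∧ w j ≠ 0)), hr'def, if_neg hw]
      · rw [hget hja]
        by_cases h1 : a + 1 ≤ j
        · have h2 : a ≤ j := by omega
          simp only [h1, h2, true_and]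
        · have h2 : ¬ a ≤ j := by omega
          rw [if_neg (by tauto), if_neg (by tauto)]

-- ==== per-index extensionality via pyGetD ====

lemma pv_ext_pyGetD {α : Type} (d : α) (xs ys : List α) (hl : xs.length = ys.length)
    (h : ∀ j : Nat, j < xs.length →
      PySem.List.pyGetD xs (j : Int) d = PySem.List.pyGetD ys (j : Int) d) : xs = ys := by
  apply List.ext_getElem hl
  intro j h1 h2
  have hh := h j h1
  rw [PySem.List.pyGetD_eq_getElem xs d (by omega) (by exact_mod_cast h1),
      PySem.List.pyGetD_eq_getElem ys d (by omega) (by exact_mod_cast h2)] at hh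
  simpa using hh

-- ==== A's outer body only rewrites row `source` ====

lemma pv_bodyA (t : List (List Int)) (n : Int) (P : List (List (List Int))) (s : Int)
    (hs0 : 0 ≤ s) (hP : s < (P.length : Int)) (r : List (List Int)) :
    aBody t n (PySem.List.pySetD P s r) s = PySem.List.pySetD P s (aRowFull t n s r) := by
  unfold aBody aRowFull
  rw [pv_init_factor t s hs0 _ [] P r hP]
  rw [pv_foldl_iterate (fun st => aStep t s n st), pv_foldl_iterate (fun st => aStepRow t n st)]
  rw [pv_iter_factor t n s hs0 _ _ _ P _ hP]

lemma pv_outer (t : List (List Int)) (n : Int) :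
    ∀ (k : Nat) (a : Int) (P : List (List (List Int))), 0 ≤ a →
      (n - a).toNat ≤ k → P.length = n.toNat →
    ((PySem.List.pyRange a n 1).foldl (aBody t n) P).length = n.toNat ∧
    ∀ (j : Nat), ((PySem.List.pyRange a n 1).foldl (aBody t n) P)[j]?
      = if a ≤ (j : Int) then P[j]?.map (fun r => aRowFull t n (j : Int) r) else P[j]? := by
  intro k
  induction k with
  | zero =>
    intro a P ha hk hP
    have hna : n ≤ a := by omega
    rw [PySem.List.pyRange_one_eq_nil hna]
    refine ⟨by simpa using hP, ?_⟩
    intro j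
    simp only [List.foldl_nil]
    by_cases hj : a ≤ (j : Int)
    · rw [if_pos hj]
      have : P[j]? = none := List.getElem?_eq_none (by omega)
      rw [this]; rfl
    · rw [if_neg hj]
  | succ k ih =>
    intro a P ha hk hP
    by_cases hna : n ≤ a
    · rw [PySem.List.pyRange_one_eq_nil hna]
      refine ⟨by simpa using hP, ?_⟩
      intro j
      simp only [List.foldl_nil]
      by_cases hj : a ≤ (j : Int)
      · rw [if_pos hj]
        have : P[j]? = none := List.getElem?_eq_none (by omega)
        rw [this]; rfl
      · rw [if_neg hj]
    · have han : a < n := by omega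
      rw [PySem.List.pyRange_one_cons han, List.foldl_cons]
      have hsplit : aBody t n P a = PySem.List.pySetD P a (aRowFull t n a (PySem.List.pyGetD P a [])) := by
        have hb := pv_bodyA t n P a ha (by omega) (PySem.List.pyGetD P a [])
        rw [pv_set_get_self P [] ha (by omega)] at hb
        exact hb
      rw [hsplit]
      have hP' : (PySem.List.pySetD P a (aRowFull t n a (PySem.List.pyGetD P a []))).length = n.toNat := by
        simp [PySem.List.length_pySetD, hP]
      obtain ⟨e1, e2⟩ := ih (a + 1) _ (by omega) (by omega) hP'
      refine ⟨e1, ?_⟩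
      intro j
      rw [e2 j]
      rw [PySem.List.pySetD_of_nonneg _ _ ha]
      by_cases hja : (j : Int) = a
      · have hj1 : ¬ (a + 1 ≤ (j : Int)) := by omega
        have hj2 : a ≤ (j : Int) := by omega
        have hjt : a.toNat = j := by omega
        subst hjt
        rw [if_neg hj1, if_pos hj2]
        have hl1 : a.toNat < P.length := by omega
        have hl2 : a.toNat < (P.set a.toNat (aRowFull t n a (PySem.List.pyGetD P a []))).length := by
          simpa using hl1
        rw [List.getElem?_eq_getElem hl2, List.getElem?_eq_getElem hl1]
        simp only [Option.map_some]
        simp only [List.getElem_set, if_true]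
        rw [PySem.List.pyGetD_eq_getElem P [] ha (by omega)]
        rw [hja]
      · have hiff : (a + 1 ≤ (j : Int)) ↔ (a ≤ (j : Int)) := by omega
        have hne : a.toNat ≠ j := by omega
        rw [List.getElem?_set_ne hne]
        by_cases h1 : a + 1 ≤ (j : Int)
        · rw [if_pos h1, if_pos (by omega)]
        · rw [if_neg h1, if_neg (by omega)]

-- ==== per-source equivalence (A's row = m-loop row) ====

lemma pv_dijkstra_eq_fold (t : List (List Int)) (n : Int) :
    dijkstra_init t n = (PySem.List.pyRange 0 n 1).foldl (aBody t n)
      ((PySem.List.pyRange 0 n 1).map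
        (fun _x => (PySem.List.pyRange 0 n 1).map (fun _y => ([] : List Int)))) := rfl

lemma pv_source (t : List (List Int)) (n s : Int) (hs0 : 0 ≤ s) (hsn : s < n) :
    aRowFull t n s ((PySem.List.pyRange 0 n 1).map (fun _y => ([] : List Int))) = mRow t n s := by
  have hlenR : (PySem.List.pyRange 0 n 1).length = n.toNat := by
    simp [PySem.List.length_pyRange_one]
  have hrow0len : ((PySem.List.pyRange 0 n 1).map (fun _y => ([] : List Int))).length = n.toNat := by
    simp [PySem.List.length_pyRange_one]
  obtain ⟨e1, e2, e3⟩ := pv_initrow t s n (n - 0).toNat 0 [] _ le_rfl le_rfl hrow0len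
  have hbrow : mRow t n s
      = mLoop t
          ((PySem.List.pyRange 0 n 1).map
            (fun dst => PySem.List.pyGetD (PySem.List.pyGetD t s []) dst 0))
          ((PySem.List.pyRange 0 n 1).filter (fun v => decide (v ≠ s)))
          ((PySem.List.pyRange 0 n 1).map
            (fun dst => if PySem.List.pyGetD ((PySem.List.pyRange 0 n 1).map
                (fun dst => PySem.List.pyGetD (PySem.List.pyGetD t s []) dst 0)) dst 0 ≠ 0
              then [s] else ([] : List Int))) := rfl
  have hroweq : ((PySem.List.pyRange 0 n 1).foldl (aInitRow t s)
        ([], (PySem.List.pyRange 0 n 1).map (fun _y => ([] : List Int)))).2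
      = (PySem.List.pyRange 0 n 1).map (fun dst =>
          if PySem.List.pyGetD ((PySem.List.pyRange 0 n 1).map
              (fun dst => PySem.List.pyGetD (PySem.List.pyGetD t s []) dst 0)) dst 0 ≠ 0
          then [s] else ([] : List Int)) := by
    apply pv_ext_pyGetD ([] : List Int)
    · rw [e2]; simp [PySem.List.length_pyRange_one]
    · intro j hj
      rw [e2] at hj
      have hjn : (j : Int) < n := by omega
      rw [e3 (j : Int) (by omega)]
      rw [PySem.List.pyGetD_map_pyRange_of_nonneg (fun _y => ([] : List Int)) n (j : Int) []
            (by omega) hjn]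
      rw [PySem.List.pyGetD_map_pyRange_of_nonneg
            (fun dst => if PySem.List.pyGetD ((PySem.List.pyRange 0 n 1).map
                (fun dst => PySem.List.pyGetD (PySem.List.pyGetD t s []) dst 0)) dst 0 ≠ 0
              then [s] else ([] : List Int)) n (j : Int) [] (by omega) hjn]
      rw [PySem.List.pyGetD_map_pyRange_of_nonneg
            (fun dst => PySem.List.pyGetD (PySem.List.pyGetD t s []) dst 0) n (j : Int) 0
            (by omega) hjn]
      by_cases hw : PySem.List.pyGetD (PySem.List.pyGetD t s []) (j : Int) 0 ≠ 0
      · rw [if_pos ⟨by omega, hjn, hw⟩, if_pos hw]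
        simp
      · rw [if_neg (by tauto), if_neg hw]
  rw [hbrow]
  unfold aRowFull
  rw [e1, hroweq]
  simp only [List.nil_append]
  rw [pv_foldl_iterate (fun st => aStepRow t n st)]
  rw [hlenR]
  refine pv_main t n n.toNat _ _ _ _ (pv_inv_init hs0 hsn) ?_
  calc ((PySem.List.pyRange 0 n 1).filter (fun v => decide (v ≠ s))).length
      ≤ (PySem.List.pyRange 0 n 1).length := List.length_filter_le _ _
    _ = n.toNat := hlenR

-- ==== the lexicographic pair order (Python tuple '<') and bInsort ====

def pLt (a b : Int × Int) : Prop := a.1 < b.1 ∨ (a.1 = b.1 ∧ a.2 < b.2)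

lemma pv_mem_bInsort (pq : List (Int × Int)) (it a : Int × Int) :
    a ∈ bInsort pq it ↔ a = it ∨ a ∈ pq := by
  induction pq with
  | nil => simp [bInsort]
  | cons x xs ih =>
    simp only [bInsort]
    split_ifs with h
    · simp only [List.mem_cons, ih]
      tauto
    · simp only [List.mem_cons]

lemma pv_bInsort_sorted (pq : List (Int × Int)) (it : Int × Int)
    (h : pq.Pairwise (fun a b => ¬ pLt b a)) :
    (bInsort pq it).Pairwise (fun a b => ¬ pLt b a) := by
  induction pq with
  | nil => simp [bInsort]
  | cons x xs ih =>
    rcases List.pairwise_cons.mp h with ⟨hx, hxs⟩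
    simp only [bInsort]
    split_ifs with hlt
    · refine List.pairwise_cons.mpr ⟨?_, ih hxs⟩
      intro b hb
      rcases (pv_mem_bInsort xs it b).mp hb with rfl | hb'
      · simp only [pLt]; omega
      · exact hx b hb'
    · refine List.pairwise_cons.mpr ⟨?_, h⟩
      intro b hb
      rcases List.mem_cons.mp hb with rfl | hb'
      · simp only [pLt]; omega
      · have hxb := hx b hb'
        simp only [pLt] at hxb ⊢
        omega

-- ==== Python min() picks the first extremal element ====

lemma pv_minF_keep (key : Int → Int) (F : Option Int → Int → Option Int)
    (hF : ∀ (m x : Int), F (some m) x = if key x < key m then some x else some m) :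
    ∀ (l : List Int) (m : Int), (∀ v ∈ l, ¬ key v < key m) →
    l.foldl F (some m) = some m := by
  intro l
  induction l with
  | nil => intro m _; rfl
  | cons x xs ih =>
    intro m h
    have hx : ¬ key x < key m := h x (by simp)
    simp only [List.foldl_cons]
    rw [hF, if_neg hx]
    exact ih m (fun v hv => h v (by simp [hv]))

lemma pv_minF_replace (key : Int → Int) (F : Option Int → Int → Option Int)
    (hF : ∀ (m x : Int), F (some m) x = if key x < key m then some x else some m) :
    ∀ (l : List Int) (m u : Int),
    l.Pairwise (· < ·) → u ∈ l → key u < key m →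
    (∀ v ∈ l, key u ≤ key v) → (∀ v ∈ l, key v = key u → u ≤ v) →
    l.foldl F (some m) = some u := by
  intro l
  induction l with
  | nil => intro m u _ hu; simp at hu
  | cons y ys ih =>
    intro m u hs hu hum hmin hfst
    rcases List.pairwise_cons.mp hs with ⟨hy, hys⟩
    simp only [List.foldl_cons]
    rw [hF]
    rcases List.mem_cons.mp hu with rfl | hu'
    · rw [if_pos hum]
      exact pv_minF_keep key F hF ys u (fun v hv => not_lt_of_ge (hmin v (by simp [hv])))
    · have hyu : y < u := hy u hu'
      have hkey : key u < key y := by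
        have h1 : key u ≤ key y := hmin y (by simp)
        rcases lt_or_eq_of_le h1 with h | h
        · exact h
        · exfalso
          have := hfst y (by simp) h.symm
          omega
      by_cases hlt : key y < key m
      · rw [if_pos hlt]
        exact ih y u hys hu' hkey (fun v hv => hmin v (by simp [hv]))
          (fun v hv hveq => hfst v (by simp [hv]) hveq)
      · rw [if_neg hlt]
        exact ih m u hys hu' hum (fun v hv => hmin v (by simp [hv]))
          (fun v hv hveq => hfst v (by simp [hv]) hveq)


lemma pv_min?_first (key : Int → Int) (l : List Int) (u : Int)
    (hs : l.Pairwise (· < ·)) (hu : u ∈ l)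
    (hmin : ∀ v ∈ l, key u ≤ key v) (hfst : ∀ v ∈ l, key v = key u → u ≤ v) :
    PySem.List.min? l key = some u := by
  cases l with
  | nil => simp at hu
  | cons x xs =>
    rcases List.pairwise_cons.mp hs with ⟨hx, hxs⟩
    simp only [PySem.List.min?, List.foldl_cons]
    rcases List.mem_cons.mp hu with rfl | hu'
    · exact pv_minF_keep key _ (fun m x => rfl) xs u
        (fun v hv => not_lt_of_ge (hmin v (by simp [hv])))
    · have hxu : x < u := hx u hu'
      have hkey : key u < key x := by
        have h1 : key u ≤ key x := hmin x (by simp)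
        rcases lt_or_eq_of_le h1 with h | h
        · exact h
        · exfalso
          have := hfst x (by simp) h.symm
          omega
      exact pv_minF_replace key _ (fun m x => rfl) xs x u hxs hu' hkey
        (fun v hv => hmin v (by simp [hv]))
        (fun v hv hveq => hfst v (by simp [hv]) hveq)

-- ==== worklist invariants ====

def pvRemV (n : Int) (visited : List Bool) (rem : List Int) : Prop :=
  rem.Pairwise (· < ·) ∧
  ∀ j : Int, j ∈ rem ↔ (0 ≤ j ∧ j < n ∧ PySem.List.pyGetD visited j false = false)

def pvEnt (n : Int) (pq : List (Int × Int)) : Prop :=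
  ∀ e ∈ pq, 0 ≤ e.2 ∧ e.2 < n ∧ e.1 ≠ 0 ∧ e.1 < WEIGHT_MAX

def pvComp (n : Int) (cost : List Int) (visited : List Bool) (pq : List (Int × Int)) : Prop :=
  ∀ v : Int, 0 ≤ v → v < n → PySem.List.pyGetD visited v false = false →
    PySem.List.pyGetD cost v 0 ≠ 0 → PySem.List.pyGetD cost v 0 < WEIGHT_MAX →
    (PySem.List.pyGetD cost v 0, v) ∈ pq

lemma pv_remv_filter {n : Int} {visited : List Bool} {rem : List Int}
    (h : pvRemV n visited rem) :
    (PySem.List.pyRange 0 n 1).filter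
      (fun j => decide (PySem.List.pyGetD visited j false = false)) = rem := by
  apply pv_sorted_eq
  · exact (PySem.List.pairwise_lt_pyRange_one 0 n).filter _
  · exact h.1
  · intro a
    simp only [List.mem_filter, PySem.List.mem_pyRange_one, h.2 a, decide_eq_true_eq]
    tauto

lemma pv_remv_step {n u : Int} {visited : List Bool} {rem : List Int}
    (h : pvRemV n visited rem) (hu : u ∈ rem) (hlen : visited.length = n.toNat) :
    pvRemV n (PySem.List.pySetD visited u true) (rem.erase u) := by
  obtain ⟨hsort, hmem⟩ := h
  obtain ⟨hu0, hun, -⟩ := (hmem u).mp hu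
  have hnd : rem.Nodup := hsort.imp (fun h => ne_of_lt h)
  refine ⟨hsort.sublist List.erase_sublist, ?_⟩
  intro j
  rw [hnd.mem_erase_iff]
  constructor
  · rintro ⟨hne, hj⟩
    obtain ⟨h0, h1, h2⟩ := (hmem j).mp hj
    refine ⟨h0, h1, ?_⟩
    rw [pv_get_set_ne visited true false hu0 h0 hne]
    exact h2
  · rintro ⟨h0, h1, h2⟩
    by_cases hne : j = u
    · exfalso
      rw [hne, pv_get_set_self visited true false hu0 (by rw [hlen]; omega)] at h2
      cases h2
    · rw [pv_get_set_ne visited true false hu0 h0 hne] at h2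
      exact ⟨hne, (hmem j).mpr ⟨h0, h1, h2⟩⟩

-- ==== the initial push loop of bSource ====

lemma pv_initpush_mem (cost : List Int) (visited : List Bool) :
    ∀ (l : List Int) (pq : List (Int × Int)) (a : Int × Int), a ∈ pq →
    a ∈ l.foldl (bInitPush cost visited) pq := by
  intro l
  induction l with
  | nil => intro pq a ha; exact ha
  | cons j tl ih =>
    intro pq a ha
    apply ih
    unfold bInitPush
    split_ifs with h
    · exact (pv_mem_bInsort pq _ a).mpr (Or.inr ha)
    · exact ha

lemma pv_initfold_sorted (cost : List Int) (visited : List Bool) :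
    ∀ (l : List Int) (pq : List (Int × Int)), pq.Pairwise (fun a b => ¬ pLt b a) →
    (l.foldl (bInitPush cost visited) pq).Pairwise (fun a b => ¬ pLt b a) := by
  intro l
  induction l with
  | nil => intro pq h; exact h
  | cons j tl ih =>
    intro pq h
    apply ih
    unfold bInitPush
    split_ifs with hc
    · exact pv_bInsort_sorted pq _ h
    · exact h

lemma pv_initfold_ent (n : Int) (cost : List Int) (visited : List Bool) :
    ∀ (l : List Int) (pq : List (Int × Int)), (∀ j ∈ l, 0 ≤ j ∧ j < n) →
    pvEnt n pq → pvEnt n (l.foldl (bInitPush cost visited) pq) := by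
  intro l
  induction l with
  | nil => intro pq _ h; exact h
  | cons j tl ih =>
    intro pq hl h
    apply ih _ (fun x hx => hl x (by simp [hx]))
    intro e he
    unfold bInitPush at he
    split_ifs at he with hc
    · rcases (pv_mem_bInsort pq _ e).mp he with rfl | he'
      · exact ⟨(hl j (by simp)).1, (hl j (by simp)).2, hc.2.1, hc.2.2⟩
      · exact h e he'
    · exact h e he

lemma pv_initfold_push (cost : List Int) (visited : List Bool) :
    ∀ (l : List Int) (pq : List (Int × Int)) (v : Int), v ∈ l →
    PySem.List.pyGetD visited v false = false → PySem.List.pyGetD cost v 0 ≠ 0 →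
    PySem.List.pyGetD cost v 0 < WEIGHT_MAX →
    (PySem.List.pyGetD cost v 0, v) ∈ l.foldl (bInitPush cost visited) pq := by
  intro l
  induction l with
  | nil => intro pq v hv; simp at hv
  | cons j tl ih =>
    intro pq v hv h1 h2 h3
    rcases List.mem_cons.mp hv with rfl | hv'
    · rw [List.foldl_cons]
      apply pv_initpush_mem
      unfold bInitPush
      rw [if_pos ⟨h1, h2, h3⟩]
      exact (pv_mem_bInsort pq _ _).mpr (Or.inl rfl)
    · exact ih _ v hv' h1 h2 h3

-- ==== B's relaxation loop: skip, projection to mRelax, and invariant preservation ====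

lemma pv_brelax_skip (t : List (List Int)) (u c : Int) (visited : List Bool)
    (st : List Int × List (List Int) × List (Int × Int)) (j : Int)
    (h : PySem.List.pyGetD visited j false ≠ false) :
    bRelax t u c visited st j = st := by
  simp only [bRelax]
  rw [if_neg (fun hc => h hc.1)]

lemma pv_brelax_filter (t : List (List Int)) (u c : Int) (visited : List Bool) :
    ∀ (l : List Int) (st : List Int × List (List Int) × List (Int × Int)),
    l.foldl (bRelax t u c visited) st
      = (l.filter (fun j => decide (PySem.List.pyGetD visited j false = false))).foldl
          (bRelax t u c visited) st := by
  intro l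
  induction l with
  | nil => intro st; rfl
  | cons j tl ih =>
    intro st
    rw [List.foldl_cons, List.filter_cons]
    by_cases h : PySem.List.pyGetD visited j false = false
    · rw [if_pos (by simpa using h), List.foldl_cons, ih]
    · rw [if_neg (by simpa using h), pv_brelax_skip t u c visited st j h, ih]

lemma pv_brelax_proj_step (t : List (List Int)) (u c : Int) (visited : List Bool)
    (cost : List Int) (row : List (List Int)) (pqa : List (Int × Int)) (j : Int)
    (hj : PySem.List.pyGetD visited j false = false) :
    (bRelax t u c visited (cost, row, pqa) j).1 = (mRelax t u c (cost, row) j).1 ∧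
    (bRelax t u c visited (cost, row, pqa) j).2.1 = (mRelax t u c (cost, row) j).2 := by
  simp only [bRelax, mRelax]
  by_cases hw : PySem.List.pyGetD (PySem.List.pyGetD t u []) j 0 = 0
  · rw [if_neg (fun hc => hc.2 hw), if_pos hw]
    exact ⟨rfl, rfl⟩
  · rw [if_pos ⟨hj, hw⟩, if_neg hw]
    by_cases h1 : PySem.List.pyGetD cost j 0 = 0 ∨
        PySem.List.pyGetD (PySem.List.pyGetD t u []) j 0 + c < PySem.List.pyGetD cost j 0
    · rw [if_pos h1, if_pos h1]
      exact ⟨rfl, rfl⟩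
    · rw [if_neg h1, if_neg h1]
      by_cases h2 : PySem.List.pyGetD (PySem.List.pyGetD t u []) j 0 + c = PySem.List.pyGetD cost j 0
      · rw [if_pos h2, if_pos h2]
        exact ⟨rfl, rfl⟩
      · rw [if_neg h2, if_neg h2]
        exact ⟨rfl, rfl⟩

lemma pv_brelax_proj (t : List (List Int)) (u c : Int) (visited : List Bool) :
    ∀ (l : List Int) (cost : List Int) (row : List (List Int)) (pqa : List (Int × Int)),
    (∀ j ∈ l, PySem.List.pyGetD visited j false = false) →
    (l.foldl (bRelax t u c visited) (cost, row, pqa)).1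
        = (l.foldl (mRelax t u c) (cost, row)).1 ∧
    (l.foldl (bRelax t u c visited) (cost, row, pqa)).2.1
        = (l.foldl (mRelax t u c) (cost, row)).2 := by
  intro l
  induction l with
  | nil => intro cost row pqa _; exact ⟨rfl, rfl⟩
  | cons j tl ih =>
    intro cost row pqa hl
    obtain ⟨e1, e2⟩ := pv_brelax_proj_step t u c visited cost row pqa j (hl j (by simp))
    simp only [List.foldl_cons]
    have hm : mRelax t u c (cost, row) j
        = ((bRelax t u c visited (cost, row, pqa) j).1,
           (bRelax t u c visited (cost, row, pqa) j).2.1) := by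
      rw [e1, e2]
    rw [hm]
    have hb : bRelax t u c visited (cost, row, pqa) j
        = ((bRelax t u c visited (cost, row, pqa) j).1,
           (bRelax t u c visited (cost, row, pqa) j).2.1,
           (bRelax t u c visited (cost, row, pqa) j).2.2) := rfl
    rw [hb]
    exact ih _ _ _ (fun x hx => hl x (by simp [hx]))

def pvQ (n : Int) (visited : List Bool)
    (st : List Int × List (List Int) × List (Int × Int)) : Prop :=
  st.1.length = n.toNat ∧ st.2.2.Pairwise (fun a b => ¬ pLt b a) ∧
  pvEnt n st.2.2 ∧ pvComp n st.1 visited st.2.2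

lemma pv_brelax_pres (t : List (List Int)) (n u c : Int) (visited : List Bool)
    (cost : List Int) (row : List (List Int)) (pq : List (Int × Int)) (j : Int)
    (hj0 : 0 ≤ j) (hjn : j < n) (h : pvQ n visited (cost, row, pq)) :
    pvQ n visited (bRelax t u c visited (cost, row, pq) j) := by
  obtain ⟨hlen, hsort, hent, hcomp⟩ := h
  dsimp only at hlen hsort hent hcomp
  unfold pvQ
  simp only [bRelax]
  split_ifs with hc h1 hpush h2
  all_goals try dsimp only
  · -- update with push
    refine ⟨by simpa [PySem.List.length_pySetD] using hlen, pv_bInsort_sorted _ _ hsort, ?_, ?_⟩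
    · intro e he
      rcases (pv_mem_bInsort pq _ e).mp he with rfl | he'
      · exact ⟨hj0, hjn, hpush.1, hpush.2⟩
      · exact hent e he'
    · intro v hv0 hvn hvv hv1 hv2
      by_cases hvj : v = j
      · subst hvj
        exact (pv_mem_bInsort pq _ _).mpr (Or.inl rfl)
      · rw [pv_get_set_ne cost _ 0 hj0 hv0 hvj] at hv1 hv2 ⊢
        exact (pv_mem_bInsort pq _ _).mpr (Or.inr (hcomp v hv0 hvn hvv hv1 hv2))
  · -- update without push
    refine ⟨by simpa [PySem.List.length_pySetD] using hlen, hsort, hent, ?_⟩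
    intro v hv0 hvn hvv hv1 hv2
    by_cases hvj : v = j
    · exfalso
      subst hvj
      exact hpush ⟨hv1, hv2⟩
    · rw [pv_get_set_ne cost _ 0 hj0 hv0 hvj] at hv1 hv2 ⊢
      exact hcomp v hv0 hvn hvv hv1 hv2
  · -- equal-cost append
    exact ⟨hlen, hsort, hent, hcomp⟩
  · -- no-op
    exact ⟨hlen, hsort, hent, hcomp⟩
  · -- skipped (visited or no edge)
    exact ⟨hlen, hsort, hent, hcomp⟩

lemma pv_brelax_pres_fold (t : List (List Int)) (n u c : Int) (visited : List Bool) :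
    ∀ (l : List Int) (st : List Int × List (List Int) × List (Int × Int)),
    (∀ j ∈ l, 0 ≤ j ∧ j < n) → pvQ n visited st →
    pvQ n visited (l.foldl (bRelax t u c visited) st) := by
  intro l
  induction l with
  | nil => intro st _ h; exact h
  | cons j tl ih =>
    intro st hl h
    apply ih _ (fun x hx => hl x (by simp [hx]))
    obtain ⟨c1, r1, q1⟩ := st
    exact pv_brelax_pres t n u c visited c1 r1 q1 j (hl j (by simp)).1 (hl j (by simp)).2 h

-- ==== the bridge: m-loop = B's worklist loop ====

lemma pv_bLoop_nil (t : List (List Int)) (n : Int) (cost : List Int)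
    (row : List (List Int)) (visited : List Bool) :
    bLoop t n cost row visited [] = row := by
  rw [bLoop]

lemma pv_bLoop_skip (t : List (List Int)) (n : Int) (cost : List Int)
    (row : List (List Int)) (visited : List Bool) (c u : Int) (rest : List (Int × Int))
    (hin : 0 ≤ u ∧ u < (visited.length : Int))
    (hsk : PySem.List.pyGetD visited u false = true ∨ c ≠ PySem.List.pyGetD cost u 0) :
    bLoop t n cost row visited ((c, u) :: rest) = bLoop t n cost row visited rest := by
  rw [bLoop]
  rw [dif_pos hin, dif_pos hsk]

lemma pv_bLoop_go (t : List (List Int)) (n : Int) (cost : List Int)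
    (row : List (List Int)) (visited : List Bool) (c u : Int) (rest : List (Int × Int))
    (hin : 0 ≤ u ∧ u < (visited.length : Int))
    (hsk : ¬ (PySem.List.pyGetD visited u false = true ∨ c ≠ PySem.List.pyGetD cost u 0)) :
    bLoop t n cost row visited ((c, u) :: rest)
      = bLoop t n
          ((PySem.List.pyRange 0 n 1).foldl (bRelax t u c (PySem.List.pySetD visited u true))
            (cost, row, rest)).1
          ((PySem.List.pyRange 0 n 1).foldl (bRelax t u c (PySem.List.pySetD visited u true))
            (cost, row, rest)).2.1
          (PySem.List.pySetD visited u true)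
          ((PySem.List.pyRange 0 n 1).foldl (bRelax t u c (PySem.List.pySetD visited u true))
            (cost, row, rest)).2.2 := by
  rw [bLoop]
  rw [dif_pos hin, dif_neg hsk]

lemma pv_bridge (t : List (List Int)) (n : Int) :
    ∀ (k : Nat) (pq : List (Int × Int)) (cost : List Int) (visited : List Bool)
      (rem : List Int) (row : List (List Int)),
      visited.length = n.toNat → cost.length = n.toNat →
      pvRemV n visited rem →
      pq.Pairwise (fun a b => ¬ pLt b a) → pvEnt n pq → pvComp n cost visited pq →
      rem.length ≤ k →
      mLoop t cost rem row = bLoop t n cost row visited pq := by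
  intro k
  induction k with
  | zero =>
    intro pq
    induction pq with
    | nil =>
      intro cost visited rem row hvl hcl hrv hs he hc hk
      have hrem : rem = [] := List.eq_nil_of_length_eq_zero (Nat.le_zero.mp hk)
      subst hrem
      rw [pv_mLoop_none t cost [] row (by simp [PySem.List.min?])]
      rw [pv_bLoop_nil]
    | cons hd rest ihq =>
      intro cost visited rem row hvl hcl hrv hs he hc hk
      have hrem : rem = [] := List.eq_nil_of_length_eq_zero (Nat.le_zero.mp hk)
      obtain ⟨c, u⟩ := hd
      obtain ⟨hu0, hun, hc0, hcW⟩ := he (c, u) (by simp)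
      have hin : 0 ≤ u ∧ u < (visited.length : Int) := ⟨hu0, by rw [hvl]; omega⟩
      have hvis : PySem.List.pyGetD visited u false = true := by
        cases hb : PySem.List.pyGetD visited u false with
        | true => rfl
        | false =>
          have : u ∈ rem := (hrv.2 u).mpr ⟨hu0, hun, hb⟩
          rw [hrem] at this
          simp at this
      rw [pv_bLoop_skip t n cost row visited c u rest hin (Or.inl hvis)]
      refine ihq cost visited rem row hvl hcl hrv (List.pairwise_cons.mp hs).2
        (fun e he' => he e (by simp [he'])) ?_ hk
      intro v hv0 hvn hvv _ _
      have : v ∈ rem := (hrv.2 v).mpr ⟨hv0, hvn, hvv⟩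
      rw [hrem] at this
      simp at this
  | succ k ihk =>
    intro pq
    induction pq with
    | nil =>
      intro cost visited rem row hvl hcl hrv hs he hc hk
      have hcand : rem.filter (fun j => decide (0 ≠ PySem.List.pyGetD cost j 0 ∧
          PySem.List.pyGetD cost j 0 < WEIGHT_MAX)) = [] := by
        rw [List.filter_eq_nil_iff]
        intro j hj hdj
        simp only [decide_eq_true_eq] at hdj
        obtain ⟨h0, h1, h2⟩ := (hrv.2 j).mp hj
        have := hc j h0 h1 h2 (fun hz => hdj.1 hz.symm) hdj.2
        simp at this
      rw [pv_mLoop_none t cost rem row (by rw [hcand]; simp [PySem.List.min?])]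
      rw [pv_bLoop_nil]
    | cons hd rest ihq =>
      intro cost visited rem row hvl hcl hrv hs he hc hk
      obtain ⟨c, u⟩ := hd
      obtain ⟨hu0, hun, hc0, hcW⟩ := he (c, u) (by simp)
      have hin : 0 ≤ u ∧ u < (visited.length : Int) := ⟨hu0, by rw [hvl]; omega⟩
      by_cases hval : PySem.List.pyGetD visited u false = false ∧
          c = PySem.List.pyGetD cost u 0
      · obtain ⟨hunv, hceq⟩ := hval
        subst hceq
        have hurem : u ∈ rem := (hrv.2 u).mpr ⟨hu0, hun, hunv⟩
        have hhead : ∀ e ∈ (PySem.List.pyGetD cost u 0, u) :: rest,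
            ¬ pLt e (PySem.List.pyGetD cost u 0, u) := by
          intro e hee
          rcases List.mem_cons.mp hee with rfl | hee'
          · simp [pLt]
          · exact (List.pairwise_cons.mp hs).1 e hee'
        have hwitf : ∀ v ∈ rem.filter (fun j => decide (0 ≠ PySem.List.pyGetD cost j 0 ∧
            PySem.List.pyGetD cost j 0 < WEIGHT_MAX)),
            ¬ pLt (PySem.List.pyGetD cost v 0, v) (PySem.List.pyGetD cost u 0, u) := by
          intro v hv
          rw [List.mem_filter] at hv
          obtain ⟨hvrem, hvd⟩ := hv
          simp only [decide_eq_true_eq] at hvd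
          obtain ⟨h0, h1, h2⟩ := (hrv.2 v).mp hvrem
          exact hhead _ (hc v h0 h1 h2 (fun hz => hvd.1 hz.symm) hvd.2)
        have hmin : PySem.List.min?
            (rem.filter (fun j => decide (0 ≠ PySem.List.pyGetD cost j 0 ∧
              PySem.List.pyGetD cost j 0 < WEIGHT_MAX)))
            (fun j => PySem.List.pyGetD cost j 0) = some u := by
          apply pv_min?_first
          · exact hrv.1.filter _
          · rw [List.mem_filter]
            exact ⟨hurem, by simp only [decide_eq_true_eq]; exact ⟨fun hz => hc0 hz.symm, hcW⟩⟩
          · intro v hv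
            have := hwitf v hv
            simp only [pLt] at this
            omega
          · intro v hv hkeq
            have := hwitf v hv
            simp only [pLt] at this
            simp only at hkeq
            omega
        rw [pv_mLoop_some t cost rem row u hmin]
        rw [pv_bLoop_go t n cost row visited (PySem.List.pyGetD cost u 0) u rest hin
          (by
            intro hcon
            rcases hcon with hcon | hcon
            · rw [hunv] at hcon; cases hcon
            · exact hcon rfl)]
        have hrv' : pvRemV n (PySem.List.pySetD visited u true) (rem.erase u) :=
          pv_remv_step hrv hurem hvl
        have hfil : (PySem.List.pyRange 0 n 1).filter
            (fun j => decide (PySem.List.pyGetD (PySem.List.pySetD visited u true) j false = false))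
            = rem.erase u := pv_remv_filter hrv'
        have hbfold : (PySem.List.pyRange 0 n 1).foldl
            (bRelax t u (PySem.List.pyGetD cost u 0) (PySem.List.pySetD visited u true))
            (cost, row, rest)
            = (rem.erase u).foldl
                (bRelax t u (PySem.List.pyGetD cost u 0) (PySem.List.pySetD visited u true))
                (cost, row, rest) := by
          rw [pv_brelax_filter, hfil]
        have hallun : ∀ j ∈ rem.erase u,
            PySem.List.pyGetD (PySem.List.pySetD visited u true) j false = false :=
          fun j hj => ((hrv'.2 j).mp hj).2.2
        have hallrng : ∀ j ∈ rem.erase u, 0 ≤ j ∧ j < n :=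
          fun j hj => ⟨((hrv'.2 j).mp hj).1, ((hrv'.2 j).mp hj).2.1⟩
        obtain ⟨hp1, hp2⟩ := pv_brelax_proj t u (PySem.List.pyGetD cost u 0)
          (PySem.List.pySetD visited u true) (rem.erase u) cost row rest hallun
        have hq0 : pvQ n (PySem.List.pySetD visited u true) (cost, row, rest) := by
          refine ⟨hcl, (List.pairwise_cons.mp hs).2, fun e he' => he e (by simp [he']), ?_⟩
          intro v hv0 hvn hvv hv1 hv2
          have hvu : v ≠ u := by
            intro hvu
            subst hvu
            rw [pv_get_set_self visited true false hu0 (by rw [hvl]; omega)] at hvv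
            cases hvv
          rw [pv_get_set_ne visited true false hu0 hv0 hvu] at hvv
          have hwit := hc v hv0 hvn hvv hv1 hv2
          rcases List.mem_cons.mp hwit with heq | hm
          · exact absurd (congrArg Prod.snd heq) hvu
          · exact hm
        have hqF := pv_brelax_pres_fold t n u (PySem.List.pyGetD cost u 0)
          (PySem.List.pySetD visited u true) (rem.erase u) (cost, row, rest) hallrng hq0
        obtain ⟨hql, hqs, hqe, hqc⟩ := hqF
        have hvl' : (PySem.List.pySetD visited u true).length = n.toNat := by
          simp [PySem.List.length_pySetD, hvl]
        have hk' : (rem.erase u).length ≤ k := by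
          have := List.length_erase_of_mem hurem
          have := List.length_pos_of_mem hurem
          omega
        rw [hbfold, ← hp1, ← hp2]
        exact ihk _ _ _ (rem.erase u) _ hvl' hql hrv' hqs hqe hqc hk'
      · have hsk : PySem.List.pyGetD visited u false = true ∨
            c ≠ PySem.List.pyGetD cost u 0 := by
          cases hb : PySem.List.pyGetD visited u false with
          | true => exact Or.inl rfl
          | false => exact Or.inr (fun hcc => hval ⟨hb, hcc⟩)
        rw [pv_bLoop_skip t n cost row visited c u rest hin hsk]
        refine ihq cost visited rem row hvl hcl hrv (List.pairwise_cons.mp hs).2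
          (fun e he' => he e (by simp [he'])) ?_ hk
        intro v hv0 hvn hvv hv1 hv2
        have hwit := hc v hv0 hvn hvv hv1 hv2
        rcases List.mem_cons.mp hwit with heq | hm
        · exfalso
          have hv_u : v = u := congrArg Prod.snd heq
          have hc_v : PySem.List.pyGetD cost v 0 = c := congrArg Prod.fst heq
          subst hv_u
          rcases hsk with hsk | hsk
          · rw [hvv] at hsk; cases hsk
          · exact hsk hc_v.symm
        · exact hm

-- ==== bSource = mRow ====

lemma pv_remv_init {n s : Int} (hs0 : 0 ≤ s) (hsn : s < n) :
    pvRemV n (PySem.List.pySetD ((PySem.List.pyRange 0 n 1).map (fun _ => false)) s true)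
      ((PySem.List.pyRange 0 n 1).filter (fun v => decide (v ≠ s))) := by
  have hlen : ((PySem.List.pyRange 0 n 1).map (fun _ => false)).length = n.toNat := by
    simp [PySem.List.length_pyRange_one]
  refine ⟨(PySem.List.pairwise_lt_pyRange_one 0 n).filter _, ?_⟩
  intro j
  simp only [List.mem_filter, PySem.List.mem_pyRange_one, decide_eq_true_eq]
  constructor
  · rintro ⟨⟨h0, h1⟩, hne⟩
    refine ⟨h0, h1, ?_⟩
    rw [pv_get_set_ne _ true false hs0 h0 hne]
    rw [PySem.List.pyGetD_map_pyRange_of_nonneg (fun _ => false) n j false h0 h1]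
  · rintro ⟨h0, h1, hf⟩
    refine ⟨⟨h0, h1⟩, ?_⟩
    intro heq
    rw [heq, pv_get_set_self _ true false hs0 (by rw [hlen]; omega)] at hf
    cases hf

lemma pv_mrow_bsource (t : List (List Int)) (n s : Int) (hs0 : 0 ≤ s) (hsn : s < n) :
    bSource t n s = mRow t n s := by
  simp only [bSource, mRow]
  have hR : ((PySem.List.pyRange 0 n 1).map
        (fun j => PySem.List.pyGetD (PySem.List.pyGetD t s []) j 0)).map
          (fun c => if c ≠ 0 then [s] else ([] : List Int))
      = (PySem.List.pyRange 0 n 1).map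
          (fun dst => if PySem.List.pyGetD ((PySem.List.pyRange 0 n 1).map
              (fun dst => PySem.List.pyGetD (PySem.List.pyGetD t s []) dst 0)) dst 0 ≠ 0
            then [s] else ([] : List Int)) := by
    rw [List.map_map]
    apply List.map_congr_left
    intro dst hdst
    rw [PySem.List.mem_pyRange_one] at hdst
    simp only [Function.comp]
    rw [PySem.List.pyGetD_map_pyRange_of_nonneg
      (fun dst => PySem.List.pyGetD (PySem.List.pyGetD t s []) dst 0) n dst 0 hdst.1 hdst.2]
  rw [hR]
  symm
  apply pv_bridge t n
    ((PySem.List.pyRange 0 n 1).filter (fun v => decide (v ≠ s))).length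
  · simp [PySem.List.length_pySetD, PySem.List.length_pyRange_one]
  · simp [PySem.List.length_pyRange_one]
  · exact pv_remv_init hs0 hsn
  · exact pv_initfold_sorted _ _ _ [] (by simp)
  · refine pv_initfold_ent n _ _ _ [] (fun j hj => ?_) (by intro e he; simp at he)
    rw [PySem.List.mem_pyRange_one] at hj
    exact hj
  · intro v hv0 hvn hvv hv1 hv2
    exact pv_initfold_push _ _ _ [] v
      (by rw [PySem.List.mem_pyRange_one]; exact ⟨hv0, hvn⟩) hvv hv1 hv2
  · exact le_rfl

-- ==== the B top level as a map ====

lemma pv_alt_map (t : List (List Int)) (n : Int) :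
    dijkstra_init_alt t n = (PySem.List.pyRange 0 n 1).map (fun s => bSource t n s) := by
  have hgen : ∀ (l : List Int) (acc : List (List (List Int))),
      l.foldl (fun result source => result ++ [bSource t n source]) acc
        = acc ++ l.map (fun s => bSource t n s) := by
    intro l
    induction l with
    | nil => intro acc; simp
    | cons x xs ih => intro acc; simp [ih]
  unfold dijkstra_init_alt
  simpa using hgen (PySem.List.pyRange 0 n 1) []

-- ===== VERDICT (by name: the statement is the Claim_ definition above) =====
theorem dijkstra_init_spec : Claim_equal_dijkstra_init := by
  intro t n _hdom _hpre
  unfold Spec_dijkstra_init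
  have hlenR : (PySem.List.pyRange 0 n 1).length = n.toNat := by
    simp [PySem.List.length_pyRange_one]
  have hP0len : ((PySem.List.pyRange 0 n 1).map
      (fun _x => (PySem.List.pyRange 0 n 1).map (fun _y => ([] : List Int)))).length = n.toNat := by
    simp [PySem.List.length_pyRange_one]
  obtain ⟨hlen, hget⟩ := pv_outer t n (n - 0).toNat 0 _ le_rfl le_rfl hP0len
  rw [pv_dijkstra_eq_fold]
  rw [pv_alt_map]
  apply List.ext_getElem?
  intro j
  rw [hget j, if_pos (by omega : (0 : Int) ≤ (j : Int))]
  rw [List.getElem?_map, List.getElem?_map]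
  by_cases hj : j < (PySem.List.pyRange 0 n 1).length
  · rw [List.getElem?_eq_getElem hj]
    simp only [Option.map_some]
    congr 1
    have hval : (PySem.List.pyRange 0 n 1)[j] = (j : Int) := by
      rw [PySem.List.getElem_pyRange_one]
      simp
    rw [hval]
    rw [pv_mrow_bsource t n (j : Int) (by omega) (by rw [hlenR] at hj; omega)]
    exact pv_source t n (j : Int) (by omega) (by rw [hlenR] at hj; omega)
  · rw [List.getElem?_eq_none (by omega)]
    rfl
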